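-- pv_equiv track=rewrite | github.com/ealmada90/DFSOptimizer | DebugOptimizer.py | orderLineup
-- ===== SOURCE A (Python) =====
-- ordered_positions = ['PG', 'PG', 'SG', 'SG', 'SF', 'SF', 'PF', 'PF', 'C']
--
-- def orderLineup(lineup, dictionary):
--     orderedLineup = []
--     for index in range(9):
--         for playerId in lineup:
--             if(dictionary[playerId] == ordered_positions[index] and playerId not in orderedLineup):
--                 orderedLineup.append(playerId)
--
--                 break
--
--     return orderedLineup
-- ===== SOURCE B (Python) =====
-- ordered_positions = ['PG', 'PG', 'SG', 'SG', 'SF', 'SF', 'PF', 'PF', 'C']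
--
-- def orderLineup(lineup, dictionary):
--     # Group player ids by position in one pass (first occurrence of each id only),
--     # then fill the nine slots by popping from the front of each position's queue.
--     queues = {}
--     seen = set()
--     for playerId in lineup:
--         pos = dictionary[playerId]
--         if playerId not in seen:
--             seen.add(playerId)
--             queues.setdefault(pos, []).append(playerId)
--     orderedLineup = []
--     for pos in ordered_positions:
--         q = queues.get(pos)
--         if q:
--             orderedLineup.append(q.pop(0))
--     return orderedLineup
-- ===== Notes on version B (the rewrite author's own statement) =====
-- stated objective: alternative
-- what changed: B replaces the nine rescans of lineup with their 'not in orderedLineup' membership checks by one grouping pass that builds a position->queue dict (deduping ids) and then pops one id per ordered slot.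
import Mathlib
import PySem

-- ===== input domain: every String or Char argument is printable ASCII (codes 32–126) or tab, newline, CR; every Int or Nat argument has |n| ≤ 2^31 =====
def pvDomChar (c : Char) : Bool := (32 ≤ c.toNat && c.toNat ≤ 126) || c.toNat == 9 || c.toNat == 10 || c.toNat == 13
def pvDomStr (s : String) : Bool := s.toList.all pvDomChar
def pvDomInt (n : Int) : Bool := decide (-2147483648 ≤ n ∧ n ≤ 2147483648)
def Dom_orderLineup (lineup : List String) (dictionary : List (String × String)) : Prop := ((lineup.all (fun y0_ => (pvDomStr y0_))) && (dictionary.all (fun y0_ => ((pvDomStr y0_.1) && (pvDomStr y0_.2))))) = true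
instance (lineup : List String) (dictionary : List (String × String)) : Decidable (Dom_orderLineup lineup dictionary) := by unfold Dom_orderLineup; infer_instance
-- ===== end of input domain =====

-- B replaces A's nine rescans of lineup (each with a 'not in orderedLineup' membership
-- check) by one grouping pass building a position→queue dict, then one pop per slot (objective: alternative).

-- ===== PORT A =====
def ordered_positions : List String := ["PG", "PG", "SG", "SG", "SF", "SF", "PF", "PF", "C"]

-- A's inner 'for playerId in lineup: … break' loop: first matching player gets appended
def pvStepA (dictionary : List (String × String)) (lineup : List String)
    (acc : List String) (pos : String) : List String :=
  match lineup.find? (fun pid =>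
      ((PySem.Dict.mk dictionary).get? pid == some pos) && !(acc.contains pid)) with
  | some pid => acc ++ [pid]
  | none => acc

def orderLineup (lineup : List String) (dictionary : List (String × String)) : List String :=
  (PySem.List.pyRange 0 9 1).foldl
    (fun acc index =>
      pvStepA dictionary lineup acc ((PySem.List.pyGet? ordered_positions index).getD ""))
    []

-- ===== PORT B =====
-- body of B's grouping loop: pos = dictionary[playerId]; if unseen, enqueue under pos
-- (dictionary[playerId] is PySem.Dict.get?; a missing key is excluded by Pre_)
def pvBStep (dictionary : List (String × String))
    (st : PySem.Dict String (List String) × PySem.Set String) (pid : String) :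
    PySem.Dict String (List String) × PySem.Set String :=
  let pos := ((PySem.Dict.mk dictionary).get? pid).getD ""
  if st.2.contains pid then st
  else (st.1.insert pos (st.1.getD pos [] ++ [pid]), PySem.Set.add st.2 pid)

def pvBuildQueues (lineup : List String) (dictionary : List (String × String)) :
    PySem.Dict String (List String) × PySem.Set String :=
  lineup.foldl (pvBStep dictionary) (PySem.Dict.empty, PySem.Set.empty)

-- one slot: q = queues.get(pos); if q: orderedLineup.append(q.pop(0))
def pvPopStep (st : PySem.Dict String (List String) × List String) (pos : String) :
    PySem.Dict String (List String) × List String :=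
  match st.1.getD pos [] with
  | [] => st
  | x :: rest => (st.1.insert pos rest, st.2 ++ [x])

def orderLineup_alt (lineup : List String) (dictionary : List (String × String)) : List String :=
  (ordered_positions.foldl pvPopStep ((pvBuildQueues lineup dictionary).1, [])).2

-- ===== PRECONDITION & SPEC =====
-- Pre_ excludes lineups containing an id missing from dictionary: on almost all such inputs
-- Python A raises KeyError (B always does); on the rare ones where every slot's scan breaks
-- before reaching the missing id, A still returns but B raises KeyError, so they are excluded too.
def Pre_orderLineup (lineup : List String) (dictionary : List (String × String)) : Prop :=
  ∀ x ∈ lineup, (PySem.Dict.mk dictionary).contains x = true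

instance (lineup : List String) (dictionary : List (String × String)) :
    Decidable (Pre_orderLineup lineup dictionary) := by unfold Pre_orderLineup; infer_instance

def pvWitness_orderLineup : List String × (List (String × String)) :=
  (["a", "b", "c"], [("a", "PG"), ("b", "C"), ("c", "PG")])

def Spec_orderLineup (lineup : List String) (dictionary : List (String × String)) (out : List String) : Prop := out = orderLineup_alt lineup dictionary
instance (lineup : List String) (dictionary : List (String × String)) (out : List String) : Decidable (Spec_orderLineup lineup dictionary out) := by unfold Spec_orderLineup; infer_instance

-- ===== CLAIM (what is proved, stated in full; the proofs are below) =====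
def Claim_equal_orderLineup : Prop := ∀ (lineup : List String) (dictionary : List (String × String)), Dom_orderLineup lineup dictionary → Pre_orderLineup lineup dictionary → Spec_orderLineup lineup dictionary (orderLineup lineup dictionary)

-- ===== LEMMAS AND PROOFS =====

-- position of a player id (under Pre_, dictionary[pid] is exactly this)
def pvPos (dictionary : List (String × String)) (pid : String) : String :=
  ((PySem.Dict.mk dictionary).get? pid).getD ""

-- first occurrences of L not already in seen, in order (proof-side view of B's dedup-while-grouping)
def pvDedup (seen : List String) : List String → List String
  | [] => []
  | x :: xs => if seen.contains x then pvDedup seen xs else x :: pvDedup (seen ++ [x]) xs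

lemma pvDedup_spec : ∀ (L seen : List String),
    (pvDedup seen L).Nodup ∧ ∀ y ∈ pvDedup seen L, seen.contains y = false ∧ y ∈ L := by
  intro L
  induction L with
  | nil => intro seen; simp [pvDedup]
  | cons x xs ih =>
    intro seen
    by_cases hc : seen.contains x
    · have h := ih seen
      simp only [pvDedup, hc, if_true]
      exact ⟨h.1, fun y hy => ⟨(h.2 y hy).1, List.mem_cons_of_mem _ (h.2 y hy).2⟩⟩
    · have h := ih (seen ++ [x])
      simp only [pvDedup, hc]
      constructor
      · refine List.nodup_cons.mpr ⟨fun hx => ?_, h.1⟩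
        have := (h.2 x hx).1
        simp at this
      · intro y hy
        rcases List.mem_cons.mp hy with rfl | hy'
        · exact ⟨by simpa using hc, List.mem_cons_self⟩
        · have := h.2 y hy'
          simp only [List.contains_append] at this
          exact ⟨by simpa using (Bool.or_eq_false_iff.mp this.1).1, List.mem_cons_of_mem _ this.2⟩

lemma pvFind_dedup (p : String → Bool) :
    ∀ (L seen : List String), (∀ y, seen.contains y = true → p y = false) →
      L.find? p = (pvDedup seen L).find? p := by
  intro L
  induction L with
  | nil => intro seen _; rfl
  | cons x xs ih =>
    intro seen hs
    by_cases hc : seen.contains x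
    · have hpx : p x = false := hs x hc
      simp only [pvDedup, hc, if_true, List.find?_cons, hpx]
      exact ih seen hs
    · have hc' : x ∉ seen := by simpa using hc
      cases hp : p x with
      | true => simp [pvDedup, hc', hp]
      | false =>
        have hrec : List.find? p xs = List.find? p (pvDedup (seen ++ [x]) xs) := by
          refine ih (seen ++ [x]) ?_
          intro y hy
          simp only [List.contains_append] at hy
          rcases Bool.or_eq_true_iff.mp hy with h1 | h1
          · exact hs y h1
          · have : y = x := by simpa using h1
            subst this; exact hp
        simp [pvDedup, hc', hp, hrec]

lemma pvBuild_inv (dictionary : List (String × String)) :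
    ∀ (L : List String) (q : PySem.Dict String (List String)) (s : PySem.Set String) (pos : String),
      (L.foldl (pvBStep dictionary) (q, s)).1.getD pos []
      = q.getD pos [] ++ (pvDedup s L).filter (fun pid => pvPos dictionary pid == pos) := by
  intro L
  induction L with
  | nil => intro q s pos; simp [pvDedup]
  | cons x xs ih =>
    intro q s pos
    rw [List.foldl_cons]
    by_cases hc : s.contains x = true
    · have hm : x ∈ s := by simpa using hc
      rw [show pvBStep dictionary (q, s) x = (q, s) from by simp [pvBStep, hm]]
      rw [ih, show pvDedup s (x :: xs) = pvDedup s xs from by simp [pvDedup, hm]]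
    · have hm : x ∉ s := by simpa using hc
      have hx : pvBStep dictionary (q, s) x =
          (q.insert (pvPos dictionary x) (q.getD (pvPos dictionary x) [] ++ [x]), s ++ [x]) := by
        simp [pvBStep, hm, PySem.Set.add, pvPos]
      rw [hx, ih, show pvDedup s (x :: xs) = x :: pvDedup (s ++ [x]) xs from by simp [pvDedup, hm]]
      rw [List.filter_cons, PySem.Dict.getD_insert]
      by_cases hpos : pos = pvPos dictionary x
      · subst hpos
        simp [List.append_assoc]
      · have hb : (pvPos dictionary x == pos) = false :=
          beq_eq_false_iff_ne.mpr (fun h => hpos h.symm)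
        simp [if_neg hpos, hb]

lemma pvPop_inv (lineup : List String) (dictionary : List (String × String))
    (hK : ∀ x ∈ lineup, (PySem.Dict.mk dictionary).contains x = true) :
    ∀ (P : List String) (q : PySem.Dict String (List String)) (acc : List String),
      (∀ pos, q.getD pos [] =
        (pvDedup [] lineup).filter (fun pid => pvPos dictionary pid == pos && !acc.contains pid)) →
      (P.foldl pvPopStep (q, acc)).2 = P.foldl (pvStepA dictionary lineup) acc := by
  intro P
  induction P with
  | nil => intro q acc _; rfl
  | cons pos P' ih =>
    intro q acc hInv
    have hD : (pvDedup [] lineup).Nodup := (pvDedup_spec lineup []).1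
    -- A's find? equals the head of the corresponding filtered dedup list
    have hfind : lineup.find? (fun pid =>
        ((PySem.Dict.mk dictionary).get? pid == some pos) && !(acc.contains pid))
        = ((pvDedup [] lineup).filter
            (fun pid => pvPos dictionary pid == pos && !acc.contains pid)).head? := by
      have h1 : lineup.find? (fun pid =>
          ((PySem.Dict.mk dictionary).get? pid == some pos) && !(acc.contains pid))
          = lineup.find? (fun pid => pvPos dictionary pid == pos && !acc.contains pid) := by
        rw [← List.head?_filter, ← List.head?_filter]
        rw [List.filter_congr]
        intro y hy
        have hct := hK y hy
        rw [PySem.Dict.contains_eq_isSome_get?] at hct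
        obtain ⟨v, hv⟩ := Option.isSome_iff_exists.mp hct
        simp [pvPos, hv]
      rw [h1, pvFind_dedup _ lineup [] (by simp), List.head?_filter]
    rw [List.foldl_cons, List.foldl_cons]
    have hq := hInv pos
    rcases hF : (pvDedup [] lineup).filter
        (fun pid => pvPos dictionary pid == pos && !acc.contains pid) with _ | ⟨x, rest⟩
    · -- no player fills this slot
      have hstep : pvStepA dictionary lineup acc pos = acc := by
        unfold pvStepA; rw [hfind, hF]; rfl
      have hpop : pvPopStep (q, acc) pos = (q, acc) := by
        unfold pvPopStep; rw [show (q, acc).1.getD pos [] = [] from by rw [hq, hF]]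
      rw [hstep, hpop]; exact ih q acc hInv
    · -- player x fills this slot
      have hxmem : x ∈ (pvDedup [] lineup).filter
          (fun pid => pvPos dictionary pid == pos && !acc.contains pid) := by
        rw [hF]; exact List.mem_cons_self
      have hxpred := List.of_mem_filter hxmem
      have hxpos : pvPos dictionary x = pos := by
        have := (Bool.and_eq_true _ _).mp hxpred |>.1
        exact eq_of_beq this
      have hnodupF : ((pvDedup [] lineup).filter
          (fun pid => pvPos dictionary pid == pos && !acc.contains pid)).Nodup :=
        hD.filter _
      have hxrest : x ∉ rest := by
        rw [hF] at hnodupF; exact (List.nodup_cons.mp hnodupF).1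
      have hstep : pvStepA dictionary lineup acc pos = acc ++ [x] := by
        unfold pvStepA; rw [hfind, hF]; rfl
      have hpop : pvPopStep (q, acc) pos = (q.insert pos rest, acc ++ [x]) := by
        unfold pvPopStep; rw [show (q, acc).1.getD pos [] = x :: rest from by rw [hq, hF]]
      rw [hstep, hpop]
      refine ih _ _ ?_
      intro p
      rw [PySem.Dict.getD_insert]
      by_cases hp : p = pos
      · subst hp
        -- new queue at p is rest; the filter loses exactly x
        rw [if_pos rfl]
        have hsplit : (pvDedup [] lineup).filter
            (fun pid => pvPos dictionary pid == p && !(acc ++ [x]).contains pid)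
            = ((pvDedup [] lineup).filter
                (fun pid => pvPos dictionary pid == p && !acc.contains pid)).filter
                (fun pid => !(pid == x)) := by
          rw [List.filter_filter]
          apply List.filter_congr
          intro y _
          simp
          by_cases h1 : pvPos dictionary y = p <;> by_cases h2 : y ∈ acc <;> by_cases h3 : y = x <;>
            simp [h1, h2, h3]
        rw [hsplit, hF, List.filter_cons]
        simp only [beq_self_eq_true, Bool.not_true]
        rw [List.filter_eq_self.mpr]
        · simp
        · intro y hy
          simp [beq_eq_false_iff_ne]
          exact fun h => hxrest (h ▸ hy)
      · rw [if_neg hp, hInv p]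
        apply List.filter_congr
        intro y _
        by_cases h1 : pvPos dictionary y = p
        · have hyx : y ≠ x := fun h => hp (by rw [h, hxpos] at h1; exact h1.symm) 
          simp [h1, hyx]
        · simp [beq_eq_false_iff_ne.mpr h1]

-- ===== VERDICT (by name: the statement is the Claim_ definition above) =====
theorem orderLineup_spec : Claim_equal_orderLineup := by
  intro lineup dictionary _ hPre
  unfold Spec_orderLineup
  have hInit : ∀ pos, (pvBuildQueues lineup dictionary).1.getD pos [] =
      (pvDedup [] lineup).filter
        (fun pid => pvPos dictionary pid == pos && !(([] : List String).contains pid)) := by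
    intro pos
    rw [show pvBuildQueues lineup dictionary
          = lineup.foldl (pvBStep dictionary) (PySem.Dict.empty, PySem.Set.empty) from rfl]
    rw [pvBuild_inv]
    simp [PySem.Dict.getD_empty, PySem.Set.empty]
  have hB : orderLineup_alt lineup dictionary
      = ordered_positions.foldl (pvStepA dictionary lineup) [] :=
    pvPop_inv lineup dictionary hPre ordered_positions _ [] hInit
  have hA : orderLineup lineup dictionary
      = ordered_positions.foldl (pvStepA dictionary lineup) [] := rfl
  rw [hA, hB]
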